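-- pv_equiv track=rewrite | github.com/alvisespano/perturb | dataset/python/notorious/find_max_count.py | f__cf__b
-- ===== SOURCE A (Python) =====
-- def f__cf__b(A):
--     length = len(A)
--     foo = 2
--     max_frequency = 0
--     most_frequent = foo - foo
--     for i in range(length):
--         count = 0
--         for j in range(i + foo, length):
--             if A[i] == A[j]:
--                 count += foo
--         if count > max_frequency:
--             max_frequency = count
--             most_frequent = A[i]
--     return most_frequent
-- ===== SOURCE B (Python) =====
-- def f__cf__b(A):
--     # O(n): total counts once, then one forward pass with a running prefix counter.
--     total = {}
--     for x in A:
--         total[x] = total.get(x, 0) + 1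
--     n = len(A)
--     seen = {}
--     max_frequency = 0
--     most_frequent = 0
--     for i, x in enumerate(A):
--         seen[x] = seen.get(x, 0) + 1
--         c = total[x] - seen[x]
--         if i + 1 < n and A[i + 1] == x:
--             c -= 1
--         count = 2 * c
--         if count > max_frequency:
--             max_frequency = count
--             most_frequent = x
--     return most_frequent
-- ===== Notes on version B (the rewrite author's own statement) =====
-- stated objective: faster
-- what changed: Replaced the O(n^2) nested rescans (for each i, scan A[i+2:] counting equals) by building a total-count dict once and doing a single forward pass that maintains a running prefix counter, so each element's suffix count is total minus prefix (minus the adjacent match), with the same strict-> first-winner tie-break.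
import Mathlib
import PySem

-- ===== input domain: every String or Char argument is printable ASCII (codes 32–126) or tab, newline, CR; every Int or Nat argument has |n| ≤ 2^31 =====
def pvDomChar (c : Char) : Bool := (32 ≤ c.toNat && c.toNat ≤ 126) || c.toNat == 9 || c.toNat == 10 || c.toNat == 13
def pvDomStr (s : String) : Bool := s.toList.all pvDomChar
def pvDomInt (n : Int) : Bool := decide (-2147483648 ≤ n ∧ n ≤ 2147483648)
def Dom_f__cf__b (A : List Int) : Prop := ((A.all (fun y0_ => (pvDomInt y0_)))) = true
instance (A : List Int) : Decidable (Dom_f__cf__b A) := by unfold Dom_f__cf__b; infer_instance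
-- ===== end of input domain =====

-- B replaces A's quadratic nested scan by one total-count dict plus a single forward
-- pass with a running prefix counter (O(n)); same value on every input.

-- ===== PORT A =====
def f__cf__b (A : List Int) : Int :=
  let length : Int := (A.length : Int)
  let foo : Int := 2
  (((PySem.List.pyRange 0 length 1).foldl
    (fun (s : Int × Int) (i : Int) =>
      let count : Int := (PySem.List.pyRange (i + foo) length 1).foldl
        (fun (c : Int) (j : Int) =>
          if PySem.List.pyGetD A i 0 = PySem.List.pyGetD A j 0 then c + foo else c) 0
      if count > s.1 then (count, PySem.List.pyGetD A i 0) else s)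
    (0, 0)) : Int × Int).2

-- ===== PORT B =====
def f__cf__b_alt (A : List Int) : Int :=
  let total : PySem.Dict Int Int :=
    A.foldl (fun d x => d.insert x (d.getD x 0 + 1)) PySem.Dict.empty
  let n : Int := (A.length : Int)
  (((PySem.List.enumerate A 0).foldl
    (fun (s : PySem.Dict Int Int × Int × Int) (ix : Int × Int) =>
      let seen := s.1.insert ix.2 (s.1.getD ix.2 0 + 1)
      -- total[x] in Python: ix.2 is always a key of total, so getD is exact here
      let c0 : Int := total.getD ix.2 0 - seen.getD ix.2 0
      let c1 : Int := if ix.1 + 1 < n ∧ PySem.List.pyGetD A (ix.1 + 1) 0 = ix.2 then c0 - 1 else c0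
      let count : Int := 2 * c1
      if count > s.2.1 then (seen, count, ix.2) else (seen, s.2.1, s.2.2))
    (PySem.Dict.empty, 0, 0)) : PySem.Dict Int Int × Int × Int).2.2

-- ===== PRECONDITION & SPEC =====
def Spec_f__cf__b (A : List Int) (out : Int) : Prop := out = f__cf__b_alt A
instance (A : List Int) (out : Int) : Decidable (Spec_f__cf__b A out) := by unfold Spec_f__cf__b; infer_instance

-- ===== CLAIM (what is proved, stated in full; the proofs are below) =====
def Claim_equal_f__cf__b : Prop := ∀ (A : List Int), Dom_f__cf__b A → Spec_f__cf__b A (f__cf__b A)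

-- ===== LEMMAS AND PROOFS =====

-- common reference loop: walk the list; at x with remaining rest, the relevant count
-- is twice the number of copies of x in rest.drop 1 (skipping the adjacent element)
def pvGo : List Int → Int × Int → Int × Int
  | [], s => s
  | x :: rest, s =>
    let count : Int := 2 * ((rest.drop 1).count x : Int)
    pvGo rest (if count > s.1 then (count, x) else s)

theorem pv_foldl_add_two (v : Int) : ∀ (l : List Int) (a : Int),
    l.foldl (fun c y => if v = y then c + 2 else c) a = a + 2 * (l.count v : Int) := by
  intro l
  induction l with
  | nil => intro a; simp
  | cons y t ih =>
    intro a
    simp only [List.foldl_cons]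
    by_cases h : v = y
    · rw [if_pos h, ih, List.count_cons]
      simp [h]
      ring
    · rw [if_neg h, ih, List.count_cons]
      have h' : ¬ ((y : Int) == v) = true := by simpa using fun e => h e.symm
      simp [h']

theorem pv_A_loop (A : List Int) : ∀ (r : List Int) (k : Nat) (s : Int × Int),
    A.drop k = r →
    (PySem.List.pyRange (k : Int) (A.length : Int) 1).foldl
      (fun (s : Int × Int) (i : Int) =>
        let count : Int := (PySem.List.pyRange (i + 2) (A.length : Int) 1).foldl
          (fun (c : Int) (j : Int) =>
            if PySem.List.pyGetD A i 0 = PySem.List.pyGetD A j 0 then c + 2 else c) 0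
        if count > s.1 then (count, PySem.List.pyGetD A i 0) else s) s
    = pvGo r s := by
  intro r
  induction r with
  | nil =>
    intro k s hk
    have hlen : A.length ≤ k := by
      by_contra h
      have := (List.drop_eq_nil_iff).1 hk
      omega
    rw [PySem.List.pyRange_one_eq_nil (by exact_mod_cast hlen)]
    simp [pvGo]
  | cons x rest ih =>
    intro k s hk
    have hklt : k < A.length := by
      by_contra h
      rw [List.drop_eq_nil_iff.2 (by omega)] at hk
      simp at hk
    rw [PySem.List.pyRange_one_cons (by exact_mod_cast hklt)]
    have hx : PySem.List.pyGetD A (k : Int) 0 = x := by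
      rw [PySem.List.pyGetD_natCast, List.getD_eq_getElem?_getD]
      have h0 : (A.drop k)[0]? = some x := by rw [hk]; rfl
      rw [List.getElem?_drop] at h0
      simp only [Nat.add_zero] at h0
      rw [h0]
      rfl
    have hdrop2 : A.drop (k + 2) = rest.drop 1 := by
      have : A.drop (k + 2) = (A.drop k).drop 2 := by
        rw [List.drop_drop]
      rw [this, hk]; rfl
    have hinner :
        (PySem.List.pyRange ((k : Int) + 2) (A.length : Int) 1).foldl
          (fun (c : Int) (j : Int) =>
            if x = PySem.List.pyGetD A j 0 then c + 2 else c) 0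
        = 2 * ((rest.drop 1).count x : Int) := by
      have h0 : (0 : Int) ≤ (k : Int) + 2 := by positivity
      have := PySem.List.foldl_pyRange_pyGetD A 0
        (fun (c : Int) (y : Int) => if x = y then c + 2 else c) 0 h0
      rw [show PySem.List.len A = (A.length : Int) from by simp [PySem.List.len]] at this
      rw [this]
      have htn : ((k : Int) + 2).toNat = k + 2 := by omega
      rw [htn, hdrop2, pv_foldl_add_two]
      ring
    rw [List.foldl_cons]
    simp only [hx, hinner]
    have hrest : A.drop (k + 1) = rest := by
      have : A.drop (k + 1) = (A.drop k).drop 1 := by rw [List.drop_drop]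
      rw [this, hk]; rfl
    have := ih (k + 1) (if 2 * ((rest.drop 1).count x : Int) > s.1
        then (2 * ((rest.drop 1).count x : Int), x) else s) hrest
    rw [show pvGo (x :: rest) s = pvGo rest (if 2 * ((rest.drop 1).count x : Int) > s.1
        then (2 * ((rest.drop 1).count x : Int), x) else s) from rfl]
    rw [show ((k : Int) + 1) = ((k + 1 : Nat) : Int) from by push_cast; ring, this]

theorem pv_B_loop (A : List Int) : ∀ (r p : List Int) (s : Int × Int),
    A = p ++ r →
    ((PySem.List.enumerate r (p.length : Int)).foldl
      (fun (s : PySem.Dict Int Int × Int × Int) (ix : Int × Int) =>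
        let seen := s.1.insert ix.2 (s.1.getD ix.2 0 + 1)
        let c0 : Int := (A.foldl (fun d x => d.insert x (d.getD x 0 + 1)) PySem.Dict.empty).getD ix.2 0
            - seen.getD ix.2 0
        let c1 : Int := if ix.1 + 1 < (A.length : Int) ∧ PySem.List.pyGetD A (ix.1 + 1) 0 = ix.2
            then c0 - 1 else c0
        let count : Int := 2 * c1
        if count > s.2.1 then (seen, count, ix.2) else (seen, s.2.1, s.2.2))
      (p.foldl (fun d x => d.insert x (d.getD x 0 + 1)) PySem.Dict.empty, s)).2
    = pvGo r s := by
  intro r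
  induction r with
  | nil => intro p s _; simp [PySem.List.enumerate, pvGo]
  | cons x rest ih =>
    intro p s hA
    rw [PySem.List.enumerate_cons, List.foldl_cons]
    dsimp only
    have hseen : (p.foldl (fun d x => d.insert x (d.getD x 0 + 1))
          (PySem.Dict.empty : PySem.Dict Int Int)).insert x
        ((p.foldl (fun d x => d.insert x (d.getD x 0 + 1))
          (PySem.Dict.empty : PySem.Dict Int Int)).getD x 0 + 1)
        = (p ++ [x]).foldl (fun d x => d.insert x (d.getD x 0 + 1))
          (PySem.Dict.empty : PySem.Dict Int Int) := by
      rw [List.foldl_append]; rfl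
    have htot : (A.foldl (fun d x => d.insert x (d.getD x 0 + 1)) PySem.Dict.empty).getD x 0
        = (A.count x : Int) := by
      rw [PySem.Dict.foldl_insert_getD_add_one_eq_counter, PySem.Dict.getD_counter]
    have hsn : ((p ++ [x]).foldl (fun d x => d.insert x (d.getD x 0 + 1))
          (PySem.Dict.empty : PySem.Dict Int Int)).getD x 0
        = (p.count x : Int) + 1 := by
      rw [PySem.Dict.foldl_insert_getD_add_one_eq_counter, PySem.Dict.getD_counter]
      simp
    have hc0 : (A.count x : Int) - ((p.count x : Int) + 1) = (rest.count x : Int) := by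
      have : (A.count x : Int) = (p.count x : Int) + 1 + (rest.count x : Int) := by
        rw [hA]; push_cast [List.count_append, List.count_cons]; simp; ring
      omega
    have hc1 : (if (p.length : Int) + 1 < (A.length : Int) ∧
          PySem.List.pyGetD A ((p.length : Int) + 1) 0 = x
        then (rest.count x : Int) - 1 else (rest.count x : Int))
        = ((rest.drop 1).count x : Int) := by
      cases rest with
      | nil =>
        have hnc : ¬ ((p.length : Int) + 1 < (A.length : Int)) := by
          subst hA; simp
        rw [if_neg (fun h => hnc h.1)]
        simp
      | cons y rest' =>
        have hlt : (p.length : Int) + 1 < (A.length : Int) := by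
          subst hA; push_cast [List.length_append, List.length_cons]; omega
        have hget : PySem.List.pyGetD A ((p.length : Int) + 1) 0 = y := by
          rw [show ((p.length : Int) + 1) = ((p.length + 1 : Nat) : Int) from by push_cast; ring,
            PySem.List.pyGetD_natCast, hA, List.getD_eq_getElem?_getD]
          rw [List.getElem?_append_right (by omega)]
          simp
        by_cases hyx : y = x
        · rw [if_pos ⟨hlt, by rw [hget, hyx]⟩]
          subst hyx
          simp
        · rw [if_neg (fun h => hyx (by rw [← hget, h.2]))]
          simp [hyx]
    simp only [hseen, htot, hsn, hc0, hc1]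
    rw [show pvGo (x :: rest) s = pvGo rest (if 2 * ((rest.drop 1).count x : Int) > s.1
        then (2 * ((rest.drop 1).count x : Int), x) else s) from rfl]
    have hrec := ih (p ++ [x]) (if 2 * ((rest.drop 1).count x : Int) > s.1
        then (2 * ((rest.drop 1).count x : Int), x) else s) (by rw [hA]; simp)
    rw [show (((p ++ [x]).length : Nat) : Int) = (p.length : Int) + 1 from by simp] at hrec
    by_cases hb : 2 * ((rest.drop 1).count x : Int) > s.1
    · simp only [hb, if_true] at hrec ⊢
      exact hrec
    · simp only [hb, if_false] at hrec ⊢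
      exact hrec

-- ===== VERDICT (by name: the statement is the Claim_ definition above) =====
theorem f__cf__b_spec : Claim_equal_f__cf__b := by
  intro A _
  unfold Spec_f__cf__b f__cf__b f__cf__b_alt
  have hA := pv_A_loop A A 0 (0, 0) (by simp)
  have hB := pv_B_loop A A [] (0, 0) (by simp)
  simp only [Nat.cast_zero, List.length_nil, List.foldl_nil] at hA hB
  dsimp only
  rw [hA, hB]
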